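-- pv_equiv track=rewrite | github.com/jwasinger/endian-swap | swap.py | endian_swap_wasm
-- ===== SOURCE A (Python) =====
-- def endian_swap_wasm(val, littleEndian=True):
--   val = list(val)
--   if len(val) % 2 != 0:
--     return None
--
--   if littleEndian:
--     for i in range(0, len(val), 2):
--       end = len(val)-(i+2)
--
--       if i >= end:
--         break
--
--       tmp = val[i:i+2]
--       val[i:i+2] = val[end:end+2]
--       val[end:end+2] = tmp
--
--   res = ""
--   for i in range(0, len(val), 2):
--     res += "\\"+"".join(val[i:i+2])
--
--   return res
-- ===== SOURCE B (Python) =====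
-- def endian_swap_wasm(val, littleEndian=True):
--   val = list(val)
--   if len(val) % 2 != 0:
--     return None
--   pairs = [val[i:i+2] for i in range(0, len(val), 2)]
--   if littleEndian:
--     pairs = pairs[::-1]
--   return ''.join('\\' + ''.join(p) for p in pairs)
-- ===== Notes on version B (the rewrite author's own statement) =====
-- stated objective: simpler
-- what changed: B builds the list of 2-element chunks once, reverses the whole chunk list by slicing instead of A's in-place two-pointer slice-swap loop with a break, and renders via a single join instead of repeated string concatenation.
import Mathlib
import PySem

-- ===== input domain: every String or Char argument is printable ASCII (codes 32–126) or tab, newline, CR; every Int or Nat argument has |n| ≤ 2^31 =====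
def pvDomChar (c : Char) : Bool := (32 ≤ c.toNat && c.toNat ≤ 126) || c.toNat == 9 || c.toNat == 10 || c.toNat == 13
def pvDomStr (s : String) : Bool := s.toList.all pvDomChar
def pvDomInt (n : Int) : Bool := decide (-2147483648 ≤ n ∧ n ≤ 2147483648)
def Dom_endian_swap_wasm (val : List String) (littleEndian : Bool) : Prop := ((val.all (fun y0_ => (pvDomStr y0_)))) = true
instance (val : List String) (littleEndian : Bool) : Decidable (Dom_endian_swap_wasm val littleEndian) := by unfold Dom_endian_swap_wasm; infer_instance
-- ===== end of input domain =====

-- B replaces A's in-place two-pointer slice-swap loop and string-concatenation loop by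
-- building the chunk list once, reversing it wholesale, and joining — a simpler decomposition.

-- ===== PORT A =====
-- one iteration of A's little-endian for-loop; the Bool is the 'break' flag
def pvASwapStep (st : List String × Bool) (i : Int) : List String × Bool :=
  if st.2 then st else
    let v := st.1
    let e : Int := (v.length : Int) - (i + 2)
    if i ≥ e then (v, true)
    else
      let tmp := PySem.List.slice v (some i) (some (i + 2))
      let v1 := PySem.List.slice v none (some i) ++ PySem.List.slice v (some e) (some (e + 2))
                  ++ PySem.List.slice v (some (i + 2)) none
      let v2 := PySem.List.slice v1 none (some e) ++ tmp ++ PySem.List.slice v1 (some (e + 2)) none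
      (v2, false)

def endian_swap_wasm (val : List String) (littleEndian : Bool) : Option String :=
  if val.length % 2 ≠ 0 then none
  else
    let val1 := if littleEndian then
        ((PySem.List.pyRange 0 (val.length : Int) 2).foldl pvASwapStep (val, false)).1
      else val
    some ((PySem.List.pyRange 0 (val1.length : Int) 2).foldl
      (fun res i => res ++ ("\\" ++ PySem.Str.join "" (PySem.List.slice val1 (some i) (some (i + 2))))) "")

-- ===== PORT B =====
def endian_swap_wasm_alt (val : List String) (littleEndian : Bool) : Option String :=
  if val.length % 2 ≠ 0 then none
  else
    let pairs := (PySem.List.pyRange 0 (val.length : Int) 2).map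
      (fun i => PySem.List.slice val (some i) (some (i + 2)))
    let pairs' := if littleEndian then (PySem.List.slice? pairs none none (-1)).getD pairs else pairs
    some (PySem.Str.join "" (pairs'.map (fun p => "\\" ++ PySem.Str.join "" p)))


-- ===== PRECONDITION & SPEC =====
def Spec_endian_swap_wasm (val : List String) (littleEndian : Bool) (out : Option String) : Prop := out = endian_swap_wasm_alt val littleEndian
instance (val : List String) (littleEndian : Bool) (out : Option String) : Decidable (Spec_endian_swap_wasm val littleEndian out) := by unfold Spec_endian_swap_wasm; infer_instance

-- ===== CLAIM (what is proved, stated in full; the proofs are below) =====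
def Claim_equal_endian_swap_wasm : Prop := ∀ (val : List String) (littleEndian : Bool), Dom_endian_swap_wasm val littleEndian → Spec_endian_swap_wasm val littleEndian (endian_swap_wasm val littleEndian)

-- ===== LEMMAS AND PROOFS =====

def pvChunk2 {α : Type} : List α → List (List α)
  | x :: y :: r => [x, y] :: pvChunk2 r
  | _ => []

lemma pvChunk2_len2 {α : Type} : ∀ (l : List α) (c : List α), c ∈ pvChunk2 l → c.length = 2
  | [], c, h => by simp [pvChunk2] at h
  | [x], c, h => by simp [pvChunk2] at h
  | x :: y :: r, c, h => by
      simp only [pvChunk2, List.mem_cons] at h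
      rcases h with h | h
      · simp [h]
      · exact pvChunk2_len2 r c h

lemma pvChunk2_flatten_inv {α : Type} : ∀ (cs : List (List α)), (∀ c ∈ cs, c.length = 2) →
    pvChunk2 cs.flatten = cs
  | [], _ => rfl
  | c :: cs, h => by
      have hc : c.length = 2 := h c (by simp)
      obtain ⟨x, y, rfl⟩ : ∃ x y, c = [x, y] := by
        match c, hc with
        | [x, y], _ => exact ⟨x, y, rfl⟩
      simp only [List.flatten_cons, List.cons_append, List.nil_append, pvChunk2]
      rw [pvChunk2_flatten_inv cs (fun c hm => h c (by simp [hm]))]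

lemma pvChunk2_append_pair {α : Type} : ∀ (l : List α), l.length % 2 = 0 → ∀ (u w : α),
    pvChunk2 (l ++ [u, w]) = pvChunk2 l ++ [[u, w]]
  | [], _, u, w => rfl
  | [x], h, u, w => by simp at h
  | x :: y :: r, h, u, w => by
      simp only [List.cons_append, pvChunk2]
      rw [pvChunk2_append_pair r (by simp at h; omega)]

lemma pvFlatten_len2_length {α : Type} : ∀ (cs : List (List α)), (∀ c ∈ cs, c.length = 2) →
    cs.flatten.length = 2 * cs.length
  | [], _ => rfl
  | c :: cs, h => by
      simp only [List.flatten_cons, List.length_append, List.length_cons]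
      rw [pvFlatten_len2_length cs (fun d hm => h d (by simp [hm])), h c (by simp)]
      ring

lemma pvPr2_nil (a b : Int) (h : b ≤ a) : PySem.List.pyRange a b 2 = [] := by
  rw [PySem.List.pyRange_of_pos a b (by norm_num)]
  rw [if_neg (by omega)]
  simp

lemma pvPr2_cons (a b : Int) (h : a < b) :
    PySem.List.pyRange a b 2 = a :: PySem.List.pyRange (a + 2) b 2 := by
  rw [PySem.List.pyRange_of_pos a b (by norm_num), PySem.List.pyRange_of_pos (a+2) b (by norm_num)]
  have h1 : (if a < b then ((b - a + 2 - 1) / 2).toNat else 0)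
      = (if a + 2 < b then ((b - (a + 2) + 2 - 1) / 2).toNat else 0) + 1 := by
    split_ifs <;> omega
  rw [h1, List.range_succ_eq_map, List.map_cons, List.map_map]
  refine congrArg₂ _ (by simp) ?_
  apply List.map_congr_left
  intro k _
  simp only [Function.comp_apply, Nat.succ_eq_add_one]
  push_cast
  ring

lemma pvFoldl_flagged : ∀ (l : List Int) (v : List String), l.foldl pvASwapStep (v, true) = (v, true)
  | [], v => rfl
  | i :: l, v => by
      rw [List.foldl_cons]
      have : pvASwapStep (v, true) i = (v, true) := by simp [pvASwapStep]
      rw [this]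
      exact pvFoldl_flagged l v

lemma pvExists_last_two {α : Type} (l : List α) (h : 2 ≤ l.length) :
    ∃ mid u w, l = mid ++ [u, w] := by
  match hrev : l.reverse with
  | [] => rw [← l.reverse_reverse, hrev] at h; simp at h
  | [x] => rw [← l.reverse_reverse, hrev] at h; simp at h
  | u :: v :: s =>
      exact ⟨s.reverse, v, u, by rw [← l.reverse_reverse, hrev]; simp⟩

lemma pvPairsEq : ∀ (n : Nat) (m : List String), m.length ≤ n → m.length % 2 = 0 →
    ∀ (t : Nat) (v : List String), v.drop (2 * t) = m → v.length = 2 * t + m.length →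
    (PySem.List.pyRange ((2 * t : Nat) : Int) ((v.length : Nat) : Int) 2).map
        (fun i => PySem.List.slice v (some i) (some (i + 2))) = pvChunk2 m := by
  intro n
  induction n with
  | zero =>
      intro m hle _ t v hdrop hlen
      have hm : m = [] := by
        cases m with
        | nil => rfl
        | cons x r => simp at hle
      subst hm
      rw [pvPr2_nil _ _ (by omega), List.map_nil]
      rfl
  | succ n ih =>
      intro m hle hev t v hdrop hlen
      match m, hev with
      | [], _ =>
          rw [pvPr2_nil _ _ (by simp at hlen; omega), List.map_nil]; rfl
      | [x], hev => simp at hev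
      | x :: y :: r, hev =>
          have hlt : ((2 * t : Nat) : Int) < ((v.length : Nat) : Int) := by
            simp only [List.length_cons] at hlen; push_cast; omega
          rw [pvPr2_cons _ _ hlt, List.map_cons]
          have h2 : ((2 * t : Nat) : Int) + 2 = ((2 * t : Nat) : Int) + ((2 : Nat) : Int) := by norm_cast
          have hsl : PySem.List.slice v (some ((2 * t : Nat) : Int)) (some (((2 * t : Nat) : Int) + 2)) = [x, y] := by
            rw [h2, PySem.List.slice_natCast_add, hdrop]
            rfl
          rw [hsl]
          have hr : PySem.List.pyRange (((2 * t : Nat) : Int) + 2) ((v.length : Nat) : Int) 2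
              = PySem.List.pyRange (((2 * (t + 1) : Nat)) : Int) ((v.length : Nat) : Int) 2 :=
            congrArg (fun z => PySem.List.pyRange z ((v.length : Nat) : Int) 2)
              (by push_cast; ring)
          rw [hr]
          have := ih r (by simp at hle; omega) (by simp at hev; omega) (t + 1) v
            (by rw [show 2 * (t + 1) = 2 * t + 1 + 1 from by ring, ← List.drop_drop, ← List.drop_drop, hdrop]; rfl)
            (by simp at hlen ⊢; omega)
          rw [this]
          rfl

lemma pvFoldl_str_append : ∀ (l : List Int) (g : Int → String) (r : String),
    (l.foldl (fun res i => res ++ g i) r).toList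
      = r.toList ++ (l.map (fun i => (g i).toList)).flatten
  | [], g, r => by simp
  | i :: l, g, r => by
      rw [List.foldl_cons, pvFoldl_str_append l g (r ++ g i)]
      simp [String.toList_append]

lemma pvJoin_nil_flatten : ∀ (cs : List (List Char)), PySem.Chars.join [] cs = cs.flatten
  | [] => PySem.Chars.join_nil []
  | [c] => by simp [PySem.Chars.join_singleton ([] : List Char) c]
  | c :: d :: cs => by
      rw [PySem.Chars.join_cons_cons, pvJoin_nil_flatten (d :: cs)]
      simp

lemma pvSwapStep_break (V : List String) (i : Int) (h : i ≥ (V.length : Int) - (i + 2)) :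
    pvASwapStep (V, false) i = (V, true) := by
  simp only [pvASwapStep, Bool.false_eq_true, if_false]
  rw [if_pos h]

lemma pvSwapStep_go (V : List String) (i : Int) (h : ¬ i ≥ (V.length : Int) - (i + 2)) :
    pvASwapStep (V, false) i =
      (PySem.List.slice
          (PySem.List.slice V none (some i)
            ++ PySem.List.slice V (some ((V.length : Int) - (i + 2))) (some ((V.length : Int) - (i + 2) + 2))
            ++ PySem.List.slice V (some (i + 2)) none) none (some ((V.length : Int) - (i + 2)))
        ++ PySem.List.slice V (some i) (some (i + 2))
        ++ PySem.List.slice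
            (PySem.List.slice V none (some i)
              ++ PySem.List.slice V (some ((V.length : Int) - (i + 2))) (some ((V.length : Int) - (i + 2) + 2))
              ++ PySem.List.slice V (some (i + 2)) none) (some ((V.length : Int) - (i + 2) + 2)) none,
       false) := by
  simp only [pvASwapStep, Bool.false_eq_true, if_false]
  rw [if_neg h]

lemma pvSwapLoop_nil (t : Nat) (a b : List String) (ha : a.length = 2 * t) (hb : b.length = 2 * t) :
    ((PySem.List.pyRange ((2 * t : Nat) : Int) (((a ++ b).length : Nat) : Int) 2).foldl
        pvASwapStep (a ++ b, false)).1 = a ++ b := by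
  cases t with
  | zero =>
      have ha0 : a = [] := List.eq_nil_of_length_eq_zero (by omega)
      have hb0 : b = [] := List.eq_nil_of_length_eq_zero (by omega)
      subst ha0; subst hb0
      rw [pvPr2_nil _ _ (by simp)]
      rfl
  | succ t' =>
      have hlen : (a ++ b).length = 4 * t' + 4 := by
        simp only [List.length_append, ha, hb]; omega
      rw [pvPr2_cons _ _ (by rw [hlen]; push_cast; omega), List.foldl_cons,
        pvSwapStep_break _ _ (by rw [hlen]; push_cast; omega), pvFoldl_flagged]

lemma pvSwapLoop : ∀ (n : Nat) (m : List String), m.length ≤ n → m.length % 2 = 0 →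
    ∀ (t : Nat) (a b : List String), a.length = 2 * t → b.length = 2 * t →
    ((PySem.List.pyRange ((2 * t : Nat) : Int) (((a ++ m ++ b).length : Nat) : Int) 2).foldl
        pvASwapStep (a ++ m ++ b, false)).1 = a ++ (pvChunk2 m).reverse.flatten ++ b := by
  intro n
  induction n with
  | zero =>
      intro m hle hev t a b ha hb
      have hm : m = [] := by cases m with | nil => rfl | cons x r => simp at hle
      subst hm
      simpa [pvChunk2] using pvSwapLoop_nil t a b ha hb
  | succ n ih =>
      intro m hle hev t a b ha hb
      match m, hle, hev with
      | [], hle, hev =>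
          simpa [pvChunk2] using pvSwapLoop_nil t a b ha hb
      | [x], hle, hev => simp at hev
      | [x, y], hle, hev =>
          have hlen : (a ++ [x, y] ++ b).length = 4 * t + 2 := by
            simp only [List.length_append, List.length_cons, List.length_nil, ha, hb]; omega
          rw [pvPr2_cons _ _ (by rw [hlen]; push_cast; omega), List.foldl_cons,
            pvSwapStep_break _ _ (by rw [hlen]; push_cast; omega), pvFoldl_flagged]
          simp [pvChunk2]
      | [x, y, z], hle, hev => simp at hev
      | x :: y :: z :: w :: r, hle, hev =>
          obtain ⟨mid, u, w2, hzw⟩ := pvExists_last_two (z :: w :: r) (by simp)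
          have hlr : r.length = mid.length := by
            have := congrArg List.length hzw
            simp only [List.length_cons, List.length_append, List.length_nil] at this
            omega
          have hmid_even : mid.length % 2 = 0 := by
            simp only [List.length_cons] at hev; omega
          have hmid_le : mid.length ≤ n := by
            simp only [List.length_cons] at hle; omega
          have hzw' : z :: w :: r = mid ++ [u, w2] := hzw
          rw [show x :: y :: z :: w :: r = x :: y :: (mid ++ [u, w2]) from by rw [← hzw']]
          set V := a ++ (x :: y :: (mid ++ [u, w2])) ++ b with hV
          have hVlen : V.length = 4 * t + mid.length + 4 := by
            simp only [hV, List.length_append, List.length_cons, List.length_nil, ha, hb]; omega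
          -- unroll the first iteration
          rw [pvPr2_cons _ _ (by rw [hVlen]; push_cast; omega), List.foldl_cons,
            pvSwapStep_go _ _ (by rw [hVlen]; push_cast; omega)]
          -- name the 'end' index
          have he : (V.length : Int) - (((2 * t : Nat) : Int) + 2) = ((2 * t + 2 + mid.length : Nat) : Int) := by
            rw [hVlen]; push_cast; ring
          rw [he]
          -- evaluate the four slices of V
          have s1 : PySem.List.slice V none (some ((2 * t : Nat) : Int)) = a := by
            rw [PySem.List.slice_to_natCast, hV, List.append_assoc, List.take_left' ha]
          have stmp : PySem.List.slice V (some ((2 * t : Nat) : Int)) (some (((2 * t : Nat) : Int) + 2)) = [x, y] := by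
            rw [show ((2 * t : Nat) : Int) + 2 = ((2 * t : Nat) : Int) + ((2 : Nat) : Int) from by norm_cast,
              PySem.List.slice_natCast_add, hV, List.append_assoc, List.drop_left' ha]
            simp
          have se : PySem.List.slice V (some ((2 * t + 2 + mid.length : Nat) : Int))
              (some (((2 * t + 2 + mid.length : Nat) : Int) + 2)) = [u, w2] := by
            rw [show ((2 * t + 2 + mid.length : Nat) : Int) + 2
                = ((2 * t + 2 + mid.length : Nat) : Int) + ((2 : Nat) : Int) from by norm_cast,
              PySem.List.slice_natCast_add]
            have hV' : V = (a ++ x :: y :: mid) ++ (u :: w2 :: b) := by simp [hV]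
            rw [hV', List.drop_left' (by
              simp only [List.length_append, List.length_cons, ha]; omega)]
            simp
          have sdrop : PySem.List.slice V (some (((2 * t : Nat) : Int) + 2)) none = mid ++ u :: w2 :: b := by
            rw [show ((2 * t : Nat) : Int) + 2 = ((2 * t + 2 : Nat) : Int) from by push_cast; ring,
              PySem.List.slice_from_natCast]
            have hV' : V = (a ++ [x, y]) ++ (mid ++ u :: w2 :: b) := by simp [hV]
            rw [hV', List.drop_left' (by
              simp only [List.length_append, List.length_cons, List.length_nil, ha])]
          rw [s1, stmp, se, sdrop]
          -- evaluate the two slices of the once-assigned list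
          have sE : PySem.List.slice (a ++ [u, w2] ++ (mid ++ u :: w2 :: b)) none
              (some ((2 * t + 2 + mid.length : Nat) : Int)) = a ++ u :: w2 :: mid := by
            rw [PySem.List.slice_to_natCast]
            rw [show a ++ [u, w2] ++ (mid ++ u :: w2 :: b) = (a ++ u :: w2 :: mid) ++ (u :: w2 :: b) from by simp]
            exact List.take_left' (by
              simp only [List.length_append, List.length_cons, ha]; omega)
          have sE2 : PySem.List.slice (a ++ [u, w2] ++ (mid ++ u :: w2 :: b))
              (some (((2 * t + 2 + mid.length : Nat) : Int) + 2)) none = b := by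
            rw [show ((2 * t + 2 + mid.length : Nat) : Int) + 2 = ((2 * t + 2 + mid.length + 2 : Nat) : Int) from by push_cast; ring,
              PySem.List.slice_from_natCast]
            rw [show a ++ [u, w2] ++ (mid ++ u :: w2 :: b) = (a ++ [u, w2] ++ mid ++ [u, w2]) ++ b from by simp]
            exact List.drop_left' (by
              simp only [List.length_append, List.length_cons, List.length_nil, ha])
          rw [sE, sE2]
          -- reshape the state and the range for the induction hypothesis
          rw [show (a ++ u :: w2 :: mid) ++ [x, y] ++ b = (a ++ [u, w2]) ++ mid ++ (x :: y :: b) from by simp]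
          rw [show ((2 * t : Nat) : Int) + 2 = ((2 * (t + 1) : Nat) : Int) from by push_cast; ring]
          rw [show (V.length : Nat) = ((a ++ [u, w2]) ++ mid ++ (x :: y :: b)).length from by
            simp only [hVlen, List.length_append, List.length_cons, List.length_nil, ha, hb]; omega]
          rw [ih mid hmid_le hmid_even (t + 1) (a ++ [u, w2]) (x :: y :: b)
            (by simp only [List.length_append, List.length_cons, List.length_nil, ha]; omega)
            (by simp only [List.length_cons, hb]; omega)]
          -- both sides are the pair-reversed list
          simp only [pvChunk2, pvChunk2_append_pair mid hmid_even]
          simp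

lemma pvPairs0 (v : List String) (hv : v.length % 2 = 0) :
    (PySem.List.pyRange 0 ((v.length : Nat) : Int) 2).map
      (fun i => PySem.List.slice v (some i) (some (i + 2))) = pvChunk2 v := by
  have := pvPairsEq v.length v le_rfl hv 0 v (by simp) (by simp)
  simpa using this

lemma pvSwap0 (v : List String) (hv : v.length % 2 = 0) :
    ((PySem.List.pyRange 0 ((v.length : Nat) : Int) 2).foldl pvASwapStep (v, false)).1
      = (pvChunk2 v).reverse.flatten := by
  have := pvSwapLoop v.length v le_rfl hv 0 [] [] rfl rfl
  simpa using this

lemma pvRender_toList (pairs : List (List String)) :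
    (PySem.Str.join "" (pairs.map (fun p => "\\" ++ PySem.Str.join "" p))).toList
      = (pairs.map (fun p => ("\\" ++ PySem.Str.join "" p).toList)).flatten := by
  rw [PySem.Str.toList_join]
  have h0 : ("" : String).toList = [] := rfl
  rw [h0, pvJoin_nil_flatten, List.map_map]
  rfl

lemma pvARender_toList (v : List String) (hv : v.length % 2 = 0) :
    ((PySem.List.pyRange 0 ((v.length : Nat) : Int) 2).foldl
      (fun res i => res ++ ("\\" ++ PySem.Str.join "" (PySem.List.slice v (some i) (some (i + 2))))) "").toList
      = ((pvChunk2 v).map (fun p => ("\\" ++ PySem.Str.join "" p).toList)).flatten := by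
  rw [pvFoldl_str_append]
  have h0 : ("" : String).toList = [] := rfl
  rw [h0, List.nil_append]
  rw [show (fun i => (("\\" ++ PySem.Str.join "" (PySem.List.slice v (some i) (some (i + 2)))).toList))
      = (fun p => ("\\" ++ PySem.Str.join "" p).toList) ∘ (fun i => PySem.List.slice v (some i) (some (i + 2))) from rfl]
  rw [← List.map_map, pvPairs0 v hv]

lemma pvMain : ∀ (val : List String) (littleEndian : Bool),
    endian_swap_wasm val littleEndian = endian_swap_wasm_alt val littleEndian := by
  intro val le
  unfold endian_swap_wasm endian_swap_wasm_alt
  by_cases hpar : val.length % 2 = 0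
  · have hne : ¬(val.length % 2 ≠ 0) := not_not_intro hpar
    simp only [if_neg hne]
    cases le with
    | false =>
        simp only [Bool.false_eq_true, if_false]
        refine congrArg some (String.toList_inj.mp ?_)
        rw [pvARender_toList val hpar, pvRender_toList, pvPairs0 val hpar]
    | true =>
        simp only [if_true]
        rw [pvSwap0 val hpar, PySem.List.slice?_none_none_neg_one, Option.getD_some,
          pvPairs0 val hpar]
        have hlen2 : ∀ c ∈ (pvChunk2 val).reverse, c.length = 2 :=
          fun c hc => pvChunk2_len2 val c (List.mem_reverse.mp hc)
        have hF : ((pvChunk2 val).reverse.flatten).length % 2 = 0 := by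
          rw [pvFlatten_len2_length _ hlen2]; omega
        refine congrArg some (String.toList_inj.mp ?_)
        rw [pvARender_toList _ hF, pvRender_toList, pvChunk2_flatten_inv _ hlen2]
  · rw [if_pos hpar, if_pos hpar]

-- ===== VERDICT (by name: the statement is the Claim_ definition above) =====
theorem endian_swap_wasm_spec : Claim_equal_endian_swap_wasm := by
  intro val littleEndian _
  exact pvMain val littleEndian
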